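-- pv_equiv track=rewrite | github.com/aydinkhan2005/earnings-call-analyser | app/app.py | prev_quarters
-- ===== SOURCE A (Python) =====
-- QUARTERS = ["Q1", "Q2", "Q3", "Q4"]
--
-- def prev_quarters(q: str, year: int, n: int = 5):
--     """Return list of (quarter, year) going back n periods."""
--     qi = QUARTERS.index(q)
--     result = []
--     for _ in range(n):
--         qi -= 1
--         if qi < 0:
--             qi = 3
--             year -= 1
--         result.append((QUARTERS[qi], year))
--     return result
-- ===== SOURCE B (Python) =====
-- QUARTERS = ["Q1", "Q2", "Q3", "Q4"]
--
-- def prev_quarters(q: str, year: int, n: int = 5):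
--     """Return list of (quarter, year) going back n periods."""
--     total = year * 4 + QUARTERS.index(q)
--     return [(QUARTERS[(total - k) % 4], (total - k) // 4) for k in range(1, n + 1)]
-- ===== Notes on version B (the rewrite author's own statement) =====
-- stated objective: idiomatic
-- what changed: Replaces the stateful loop over separate quarter-index/year variables with a wrap-around branch by a single absolute quarter counter total = year*4 + qi and a comprehension computing each period as divmod(total-k, 4).
import Mathlib
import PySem

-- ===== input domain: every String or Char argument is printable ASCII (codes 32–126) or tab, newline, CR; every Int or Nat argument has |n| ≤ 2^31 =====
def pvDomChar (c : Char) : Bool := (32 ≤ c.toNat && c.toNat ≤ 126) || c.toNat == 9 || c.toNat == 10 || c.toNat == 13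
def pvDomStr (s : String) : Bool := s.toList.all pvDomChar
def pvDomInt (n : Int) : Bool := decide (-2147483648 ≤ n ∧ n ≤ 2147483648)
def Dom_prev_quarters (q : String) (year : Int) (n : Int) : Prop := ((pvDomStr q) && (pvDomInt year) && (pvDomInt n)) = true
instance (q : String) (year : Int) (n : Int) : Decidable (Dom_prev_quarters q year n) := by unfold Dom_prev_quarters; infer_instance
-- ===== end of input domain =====

-- B replaces A's stateful quarter-index/year loop with an absolute quarter counter and divmod (idiomatic; same cost).

-- ===== PORT A =====
def pvQuarters : List String := ["Q1", "Q2", "Q3", "Q4"]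

-- the body of A's 'for _ in range(n)' loop, carrying (qi, year) and appending one pair per step
def pvLoopA : Nat → Int → Int → List (String × Int)
  | 0, _, _ => []
  | m + 1, qi, year =>
    let qi' := qi - 1
    if qi' < 0 then
      (PySem.List.pyGetD pvQuarters 3 "", year - 1) :: pvLoopA m 3 (year - 1)
    else
      (PySem.List.pyGetD pvQuarters qi' "", year) :: pvLoopA m qi' year

def prev_quarters (q : String) (year : Int) (n : Int) : List (String × Int) :=
  match PySem.List.index? pvQuarters q with
  | none => []          -- Python raises ValueError here; excluded by Pre_
  | some qi => pvLoopA n.toNat (qi : Int) year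

-- ===== PORT B =====
def prev_quarters_alt (q : String) (year : Int) (n : Int) : List (String × Int) :=
  match PySem.List.index? pvQuarters q with
  | none => []          -- Python raises ValueError here; excluded by Pre_
  | some qi =>
    let total : Int := year * 4 + (qi : Int)
    (PySem.List.pyRange 1 (n + 1) 1).map (fun k =>
      (PySem.List.pyGetD pvQuarters (PySem.Int.mod (total - k) 4) "",
       PySem.Int.floordiv (total - k) 4))

-- ===== PRECONDITION & SPEC =====
-- Pre_ excludes exactly the q not in QUARTERS, on which A raises ValueError.
def Pre_prev_quarters (q : String) (year : Int) (n : Int) : Prop := q ∈ pvQuarters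
instance (q : String) (year : Int) (n : Int) : Decidable (Pre_prev_quarters q year n) := by unfold Pre_prev_quarters; infer_instance
def pvWitness_prev_quarters : String × Int × Int := ("Q1", 2020, 5)

def Spec_prev_quarters (q : String) (year : Int) (n : Int) (out : List (String × Int)) : Prop := out = prev_quarters_alt q year n
instance (q : String) (year : Int) (n : Int) (out : List (String × Int)) : Decidable (Spec_prev_quarters q year n out) := by unfold Spec_prev_quarters; infer_instance

-- ===== CLAIM (what is proved, stated in full; the proofs are below) =====
def Claim_equal_prev_quarters : Prop := ∀ (q : String) (year : Int) (n : Int), Dom_prev_quarters q year n → Pre_prev_quarters q year n → Spec_prev_quarters q year n (prev_quarters q year n)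

-- ===== LEMMAS AND PROOFS =====

-- one output pair of B, as a function of the absolute quarter counter
def pvStep (t : Int) : String × Int :=
  (PySem.List.pyGetD pvQuarters (PySem.Int.mod t 4) "", PySem.Int.floordiv t 4)

lemma pvMod4 (t r : Int) (h : t % 4 = r) : PySem.Int.mod t 4 = r := by
  rw [PySem.Int.mod_eq_emod_of_pos (by norm_num)]; omega

lemma pvDiv4 (t d : Int) (h : t / 4 = d) : PySem.Int.floordiv t 4 = d := by
  rw [PySem.Int.floordiv_eq_ediv_of_pos (by norm_num)]; omega

lemma pvStep_eq (t qi y : Int) (h0 : 0 ≤ qi) (h3 : qi < 4) (ht : t = y * 4 + qi) :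
    pvStep t = (PySem.List.pyGetD pvQuarters qi "", y) := by
  have hm : PySem.Int.mod t 4 = qi := pvMod4 _ _ (by omega)
  have hd : PySem.Int.floordiv t 4 = y := pvDiv4 _ _ (by omega)
  simp only [pvStep]
  rw [hm, hd]

lemma pvLoopA_eq (m : Nat) : ∀ (qi year : Int), 0 ≤ qi → qi < 4 →
    pvLoopA m qi year =
      (List.range m).map (fun (j : Nat) => pvStep (year * 4 + qi - ((j : Int) + 1))) := by
  induction m with
  | zero => intro qi year _ _; simp [pvLoopA]
  | succ m ih =>
    intro qi year h0 h3
    rw [List.range_succ_eq_map, List.map_cons, List.map_map]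
    by_cases hq : qi - 1 < 0
    · have hq0 : qi = 0 := by omega
      subst hq0
      simp only [pvLoopA, if_pos hq]
      refine congrArg₂ _ ?_ ?_
      · exact (pvStep_eq _ 3 (year - 1) (by norm_num) (by norm_num) (by push_cast; ring)).symm
      · rw [ih 3 (year - 1) (by norm_num) (by norm_num)]
        refine List.map_congr_left ?_
        intro j _
        show pvStep _ = pvStep _
        refine congrArg pvStep ?_
        push_cast
        ring
    · simp only [pvLoopA, if_neg hq]
      refine congrArg₂ _ ?_ ?_
      · exact (pvStep_eq _ (qi - 1) year (by omega) (by omega) (by push_cast; ring)).symm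
      · rw [ih (qi - 1) year (by omega) (by omega)]
        refine List.map_congr_left ?_
        intro j _
        show pvStep _ = pvStep _
        refine congrArg pvStep ?_
        push_cast
        ring

-- ===== VERDICT (by name: the statement is the Claim_ definition above) =====
theorem prev_quarters_spec : Claim_equal_prev_quarters := by
  intro q year n _ hpre
  unfold Spec_prev_quarters prev_quarters prev_quarters_alt
  have hsome : (PySem.List.index? pvQuarters q).isSome = true := (PySem.List.index?_isSome_iff pvQuarters q).2 hpre
  cases hidx : PySem.List.index? pvQuarters q with
  | none => rfl
  | some qi =>
    obtain ⟨hk, _, _⟩ := PySem.List.getElem_of_index?_eq_some hidx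
    have hqi4 : qi < 4 := by simpa [pvQuarters] using hk
    simp only []
    rw [pvLoopA_eq n.toNat (qi : Int) year (by positivity) (by exact_mod_cast hqi4)]
    rw [PySem.List.pyRange_one]
    have hlen : ((n + 1 : Int) - 1).toNat = n.toNat := by omega
    rw [hlen, List.map_map]
    refine List.map_congr_left ?_
    intro j _
    show pvStep _ = _
    simp only [Function.comp_apply, pvStep]
    have harg : year * 4 + (qi : Int) - ((j : Int) + 1) = year * 4 + (qi : Int) - (1 + (j : Int)) := by ring
    rw [harg]
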